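-- pv_equiv track=rewrite | github.com/meynmd/forwardbackward | fb.py | EnumAligns
-- ===== SOURCE A (Python) =====
-- def EnumAligns(ephon, jphon, pre = []):
--     aligns = []
--     ep = ephon[0]
--     for i in range(1, min(3, len(jphon)) + 1):
--         js = tuple(jphon[: i])
--         if len(ephon) == 1 and len(jphon) - i == 0:
--             aligns.append(pre + [(ep, js)])
--         elif len(ephon) == 1 or len(jphon) - i == 0:
--             continue
--         else:
--             s = [(ep, js)]
--             post = EnumAligns(ephon[1 :], jphon[i :], s)
--             for p in post:
--                 aligns.append(pre + p)
--
--     return aligns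
-- ===== SOURCE B (Python) =====
-- def EnumAligns(ephon, jphon, pre = []):
--     # Bottom-up DP over suffixes: row[j] holds all alignments of the current
--     # ephon suffix against jphon[j:], built from the next row; each cell is
--     # computed once instead of re-explored by a branching recursion.
--     n, m = len(ephon), len(jphon)
--     row = [[] for _ in range(m)] + [[[]]]
--     for k in range(n - 1, -1, -1):
--         new = []
--         for j in range(m + 1):
--             cell = []
--             for i in range(1, 4):
--                 if j + i <= m:
--                     for rest in row[j + i]:
--                         cell.append([(ephon[k], tuple(jphon[j:j + i]))] + rest)
--             new.append(cell)
--         row = new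
--     return [pre + a for a in row[0]]
-- ===== Notes on version B (the rewrite author's own statement) =====
-- stated objective: alternative
-- what changed: Replaces A's branching recursion (which re-explores each (ephon-suffix, jphon-suffix) pair once per path reaching it) with a bottom-up dynamic-programming table over suffix pairs, each cell computed exactly once from the next row.
import Mathlib
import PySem

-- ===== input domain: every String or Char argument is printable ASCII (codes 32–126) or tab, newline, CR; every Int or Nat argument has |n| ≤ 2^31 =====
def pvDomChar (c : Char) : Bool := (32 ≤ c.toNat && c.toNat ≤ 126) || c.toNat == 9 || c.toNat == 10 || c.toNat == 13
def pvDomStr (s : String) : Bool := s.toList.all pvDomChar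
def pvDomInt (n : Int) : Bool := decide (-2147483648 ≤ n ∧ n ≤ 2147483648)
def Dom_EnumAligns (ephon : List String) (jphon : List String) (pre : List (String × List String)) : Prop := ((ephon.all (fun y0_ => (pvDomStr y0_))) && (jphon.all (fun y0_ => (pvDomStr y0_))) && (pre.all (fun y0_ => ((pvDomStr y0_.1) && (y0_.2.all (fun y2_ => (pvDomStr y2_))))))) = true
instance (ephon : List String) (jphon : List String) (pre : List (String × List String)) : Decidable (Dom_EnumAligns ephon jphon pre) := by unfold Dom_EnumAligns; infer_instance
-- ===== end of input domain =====

-- B replaces A's branching recursion (which re-explores each suffix pair many times) by a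
-- bottom-up DP over suffixes computing each cell once; equivalence is on the return value.

-- ===== PORT A =====
-- literal port of A's recursion; the 'for i in range(...)' loop is EnumAlignsLoop,
-- threading the 'aligns' accumulator exactly as the Python does.
mutual
def EnumAligns (ephon : List String) (jphon : List String) (pre : List (String × List String)) : List (List (String × List String)) :=
  match ephon with
  | [] => []   -- Python: 'ephon[0]' raises IndexError here; excluded by Pre_EnumAligns
  | ep :: etail =>
    EnumAlignsLoop ep etail jphon pre (PySem.List.pyRange 1 (min 3 (jphon.length : Int) + 1) 1) []
  termination_by (ephon.length, 1, 0)

def EnumAlignsLoop (ep : String) (etail jphon : List String) (pre : List (String × List String))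
    (is : List Int) (aligns : List (List (String × List String))) : List (List (String × List String)) :=
  match is with
  | [] => aligns
  | i :: rest =>
    let js := PySem.List.slice jphon none (some i)           -- jphon[: i]
    if etail = [] ∧ (jphon.length : Int) - i = 0 then
      EnumAlignsLoop ep etail jphon pre rest (aligns ++ [pre ++ [(ep, js)]])
    else if etail = [] ∨ (jphon.length : Int) - i = 0 then
      EnumAlignsLoop ep etail jphon pre rest aligns
    else
      let post := EnumAligns etail (PySem.List.slice jphon (some i) none) [(ep, js)]
      EnumAlignsLoop ep etail jphon pre rest (aligns ++ post.map (fun p => pre ++ p))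
  termination_by (etail.length + 1, 0, is.length)
end

-- ===== PORT B =====
def EnumAligns_alt (ephon : List String) (jphon : List String) (pre : List (String × List String)) : List (List (String × List String)) :=
  let n : Int := ephon.length
  let m : Int := jphon.length
  -- row = [[] for _ in range(m)] + [[[]]]
  let row0 : List (List (List (String × List String))) :=
    (PySem.List.pyRange 0 m 1).map (fun _ => []) ++ [[[]]]
  -- for k in range(n - 1, -1, -1): rebuild the row from the next one
  let row := (PySem.List.pyRange (n - 1) (-1) (-1)).foldl (fun row k =>
      (PySem.List.pyRange 0 (m + 1) 1).foldl (fun new j =>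
        let cell := (PySem.List.pyRange 1 4 1).foldl (fun cell i =>
          if j + i ≤ m then
            cell ++ (PySem.List.pyGetD row (j + i) []).map
              (fun rest => [(PySem.List.pyGetD ephon k "", PySem.List.slice jphon (some j) (some (j + i)))] ++ rest)
          else cell) []
        new ++ [cell]) []) row0
  (PySem.List.pyGetD row 0 []).map (fun a => pre ++ a)

-- ===== PRECONDITION & SPEC =====
-- Pre_ excludes exactly ephon = [], where the Python A raises IndexError on 'ephon[0]'.
def Pre_EnumAligns (ephon : List String) (jphon : List String) (pre : List (String × List String)) : Prop := ephon ≠ []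
instance (ephon : List String) (jphon : List String) (pre : List (String × List String)) : Decidable (Pre_EnumAligns ephon jphon pre) := by unfold Pre_EnumAligns; infer_instance
def pvWitness_EnumAligns : List String × List String × (List (String × List String)) := (["a"], ["x", "y"], [("p", ["q"])])

def Spec_EnumAligns (ephon : List String) (jphon : List String) (pre : List (String × List String)) (out : List (List (String × List String))) : Prop := out = EnumAligns_alt ephon jphon pre
instance (ephon : List String) (jphon : List String) (pre : List (String × List String)) (out : List (List (String × List String))) : Decidable (Spec_EnumAligns ephon jphon pre out) := by unfold Spec_EnumAligns; infer_instance

-- ===== CLAIM (what is proved, stated in full; the proofs are below) =====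
def Claim_equal_EnumAligns : Prop := ∀ (ephon : List String) (jphon : List String) (pre : List (String × List String)), Dom_EnumAligns ephon jphon pre → Pre_EnumAligns ephon jphon pre → Spec_EnumAligns ephon jphon pre (EnumAligns ephon jphon pre)

-- ===== LEMMAS AND PROOFS =====

-- reference semantics: all alignments of an ephon suffix against a jphon suffix,
-- in A's lexicographic segment-size order
def RAligns : List String → List String → List (List (String × List String))
  | [], j => if j = [] then [[]] else []
  | e :: et, j =>
    (PySem.List.pyRange 1 (min 3 (j.length : Int) + 1) 1).flatMap
      (fun i => (RAligns et (j.drop i.toNat)).map (fun p => (e, j.take i.toNat) :: p))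

theorem RAligns_nil_right (e : String) (et : List String) : RAligns (e :: et) [] = [] := by
  simp [RAligns, PySem.List.pyRange_one_eq_nil]

theorem loop_spec (ep : String) (etail jphon : List String) (pre : List (String × List String))
    (is : List Int) (acc : List (List (String × List String)))
    (hIH : ∀ j' s, etail ≠ [] → EnumAligns etail j' s = (RAligns etail j').map (fun p => s ++ p))
    (his : ∀ i ∈ is, 1 ≤ i ∧ i ≤ (jphon.length : Int)) :
    EnumAlignsLoop ep etail jphon pre is acc
      = acc ++ (is.flatMap (fun i => (RAligns etail (jphon.drop i.toNat)).map (fun p => (ep, jphon.take i.toNat) :: p))).map (fun p => pre ++ p) := by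
  induction is generalizing acc with
  | nil => simp [EnumAlignsLoop]
  | cons i rest ih =>
    obtain ⟨h1, h2⟩ := his i (by simp)
    have hrest : ∀ x ∈ rest, 1 ≤ x ∧ x ≤ (jphon.length : Int) := fun x hx => his x (by simp [hx])
    have hjs : PySem.List.slice jphon none (some i) = jphon.take i.toNat :=
      PySem.List.slice_to jphon (by omega)
    rw [EnumAlignsLoop]
    simp only [hjs]
    split_ifs with hc1 hc2
    · obtain ⟨he, hi⟩ := hc1
      subst he
      have hdrop : jphon.drop i.toNat = [] := by rw [List.drop_eq_nil_iff]; omega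
      have hle : jphon.length ≤ i.toNat := by omega
      rw [ih _ hrest]
      simp [RAligns, hle, List.append_assoc]
    · rw [ih _ hrest]
      rcases hc2 with he | hi
      · subst he
        have hi : (jphon.length : Int) - i ≠ 0 := fun h => hc1 ⟨rfl, h⟩
        have hlt : i.toNat < jphon.length := by omega
        simp [RAligns, hlt]
      · have hdrop : jphon.drop i.toNat = [] := by rw [List.drop_eq_nil_iff]; omega
        have he : etail ≠ [] := fun h => hc1 ⟨h, hi⟩
        obtain ⟨e, et, rfl⟩ : ∃ e et, etail = e :: et := by
          cases etail with | nil => exact absurd rfl he | cons a b => exact ⟨a, b, rfl⟩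
        simp [hdrop, RAligns_nil_right]
    · have he : etail ≠ [] := fun h => hc2 (Or.inl h)
      rw [hIH _ _ he, ih _ hrest]
      rw [PySem.List.slice_from jphon (by omega)]
      simp [List.map_map, List.append_assoc]

theorem A_spec (ephon : List String) : ∀ (jphon : List String) (pre : List (String × List String)), ephon ≠ [] →
    EnumAligns ephon jphon pre = (RAligns ephon jphon).map (fun p => pre ++ p) := by
  induction ephon with
  | nil => intro _ _ h; exact absurd rfl h
  | cons e et ih =>
    intro jphon pre _
    rw [EnumAligns]
    rw [loop_spec e et jphon pre _ _ (fun j' s hne => ih j' s hne)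
      (fun i hi => by
        rw [PySem.List.mem_pyRange_one] at hi
        omega)]
    simp [RAligns]

def rowSpec (ephon jphon : List String) (k : Nat) : List (List (List (String × List String))) :=
  (List.range (jphon.length + 1)).map (fun j => RAligns (ephon.drop k) (jphon.drop j))

theorem row0_spec (ephon jphon : List String) :
    ((PySem.List.pyRange 0 (jphon.length : Int) 1).map (fun _ => ([] : List (List (String × List String)))) ++ [[[]]])
      = rowSpec ephon jphon ephon.length := by
  unfold rowSpec
  rw [PySem.List.pyRange_zero_nat, List.map_map, List.range_succ, List.map_append]
  congr 1
  · apply List.map_congr_left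
    intro j hj
    rw [List.mem_range] at hj
    have : jphon.drop j ≠ [] := by rw [ne_eq, List.drop_eq_nil_iff]; omega
    simp [RAligns, this]
  · simp [RAligns, List.drop_length]

theorem tri_flatMap {α : Type} (d : Int) (hd : 0 ≤ d) (g : Int → List α) :
    (PySem.List.pyRange 1 (min 3 d + 1) 1).flatMap g
      = (if 1 ≤ d then g 1 else []) ++ ((if 2 ≤ d then g 2 else []) ++ (if 3 ≤ d then g 3 else [])) := by
  by_cases h3 : 3 ≤ d
  · have hm : min 3 d = 3 := by omega
    have hr : PySem.List.pyRange 1 (3 + 1) 1 = [1, 2, 3] := by decide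
    rw [hm, hr]
    simp [if_pos (by omega : (1:Int) ≤ d), if_pos (by omega : (2:Int) ≤ d), if_pos h3]
  · have : d = 0 ∨ d = 1 ∨ d = 2 := by omega
    rcases this with rfl | rfl | rfl
    · simp
    · simp [show PySem.List.pyRange 1 2 1 = [1] from by decide]
    · simp [show PySem.List.pyRange 1 3 1 = [1, 2] from by decide]

theorem triFold {α β : Type} (m j : Int) (f : Int → List α) :
    (PySem.List.pyRange 1 4 1).foldl (fun cell i => if j + i ≤ m then cell ++ f i else cell) []
      = (if j + 1 ≤ m then f 1 else []) ++ ((if j + 2 ≤ m then f 2 else []) ++ (if j + 3 ≤ m then f 3 else [])) := by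
  have hr : PySem.List.pyRange 1 4 1 = [1, 2, 3] := by decide
  rw [hr]
  simp only [List.foldl]
  split_ifs <;> simp

theorem cell_spec (ephon jphon : List String) (k j : Nat) (hk : k < ephon.length) (hj : j ≤ jphon.length) :
    (PySem.List.pyRange 1 4 1).foldl (fun cell i =>
        if (j : Int) + i ≤ (jphon.length : Int) then
          cell ++ (PySem.List.pyGetD (rowSpec ephon jphon (k + 1)) ((j : Int) + i) []).map
            (fun rest => [(PySem.List.pyGetD ephon (k : Int) "", PySem.List.slice jphon (some (j : Int)) (some ((j : Int) + i)))] ++ rest)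
          else cell) []
      = RAligns (ephon.drop k) (jphon.drop j) := by
  rw [triFold (β := Unit)]
  rw [List.drop_eq_getElem_cons hk, RAligns]
  have hlen : ((jphon.drop j).length : Int) = (jphon.length : Int) - j := by simp; omega
  rw [hlen, tri_flatMap _ (by omega)]
  have hchunk : ∀ i : Nat, 1 ≤ i → j + i ≤ jphon.length →
      (PySem.List.pyGetD (rowSpec ephon jphon (k + 1)) ((j : Int) + (i : Int)) []).map
        (fun rest => [(PySem.List.pyGetD ephon (k : Int) "", PySem.List.slice jphon (some (j : Int)) (some ((j : Int) + (i : Int))))] ++ rest)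
      = (RAligns (ephon.drop (k + 1)) ((jphon.drop j).drop ((i : Int)).toNat)).map
          (fun p => (ephon[k], (jphon.drop j).take ((i : Int)).toNat) :: p) := by
    intro i hi1 hi2
    have hcast : (j : Int) + (i : Int) = ((j + i : Nat) : Int) := by push_cast; ring
    rw [PySem.List.slice_natCast_add jphon j i, hcast, PySem.List.pyGetD_natCast, PySem.List.pyGetD_natCast]
    unfold rowSpec
    rw [PySem.List.getD_map_range _ _ _ _ (by omega)]
    rw [List.getD_eq_getElem _ _ hk]
    simp [List.drop_drop, Int.toNat_natCast]
  have g1 := hchunk 1 (by omega)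
  have g2 := hchunk 2 (by omega)
  have g3 := hchunk 3 (by omega)
  simp only [Nat.cast_one, Nat.cast_ofNat] at g1 g2 g3
  congr 1
  · by_cases h : (j : Int) + 1 ≤ (jphon.length : Int)
    · rw [if_pos h, if_pos (by omega), g1 (by omega)]
    · rw [if_neg h, if_neg (by omega)]
  congr 1
  · by_cases h : (j : Int) + 2 ≤ (jphon.length : Int)
    · rw [if_pos h, if_pos (by omega), g2 (by omega)]
    · rw [if_neg h, if_neg (by omega)]
  · by_cases h : (j : Int) + 3 ≤ (jphon.length : Int)
    · rw [if_pos h, if_pos (by omega), g3 (by omega)]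
    · rw [if_neg h, if_neg (by omega)]

theorem step_spec (ephon jphon : List String) (k : Nat) (hk : k < ephon.length) :
    (PySem.List.pyRange 0 ((jphon.length : Int) + 1) 1).foldl (fun new j =>
        new ++ [(PySem.List.pyRange 1 4 1).foldl (fun cell i =>
          if j + i ≤ (jphon.length : Int) then
            cell ++ (PySem.List.pyGetD (rowSpec ephon jphon (k + 1)) (j + i) []).map
              (fun rest => [(PySem.List.pyGetD ephon (k : Int) "", PySem.List.slice jphon (some j) (some (j + i)))] ++ rest)
          else cell) []]) []
      = rowSpec ephon jphon k := by
  rw [PySem.List.foldl_append_singleton_eq_map]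
  have hcast : ((jphon.length : Int) + 1) = ((jphon.length + 1 : Nat) : Int) := by push_cast; ring
  rw [hcast, PySem.List.pyRange_zero_nat, List.map_map]
  show _ = rowSpec ephon jphon k
  unfold rowSpec
  rw [List.nil_append]
  apply List.map_congr_left
  intro j hj
  rw [List.mem_range] at hj
  exact cell_spec ephon jphon k j hk (by omega)

theorem outer_spec (ephon jphon : List String) : ∀ (kk : Nat), kk ≤ ephon.length →
    (PySem.List.pyRange ((kk : Int) - 1) (-1) (-1)).foldl (fun row k =>
        (PySem.List.pyRange 0 ((jphon.length : Int) + 1) 1).foldl (fun new j =>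
          new ++ [(PySem.List.pyRange 1 4 1).foldl (fun cell i =>
            if j + i ≤ (jphon.length : Int) then
              cell ++ (PySem.List.pyGetD row (j + i) []).map
                (fun rest => [(PySem.List.pyGetD ephon k "", PySem.List.slice jphon (some j) (some (j + i)))] ++ rest)
            else cell) []]) [])
      (rowSpec ephon jphon kk)
      = rowSpec ephon jphon 0 := by
  intro kk
  induction kk with
  | zero => intro _; rw [PySem.List.pyRange_neg_one_eq_nil (by omega)]; rfl
  | succ kk ih =>
    intro hle
    have h1 : ((kk + 1 : Nat) : Int) - 1 = (kk : Int) := by push_cast; ring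
    rw [h1, PySem.List.pyRange_neg_one_cons (by omega), List.foldl_cons]
    rw [step_spec ephon jphon kk (by omega)]
    have h2 : (kk : Int) - 1 = ((kk : Int) - 1) := rfl
    exact ih (by omega)

theorem B_spec (ephon jphon : List String) (pre : List (String × List String)) :
    EnumAligns_alt ephon jphon pre = (RAligns ephon jphon).map (fun p => pre ++ p) := by
  unfold EnumAligns_alt
  simp only []
  rw [row0_spec, outer_spec ephon jphon ephon.length le_rfl, PySem.List.pyGetD_zero]
  unfold rowSpec
  rw [PySem.List.getD_map_range _ _ _ _ (by omega)]
  simp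

-- ===== VERDICT (by name: the statement is the Claim_ definition above) =====
theorem EnumAligns_spec : Claim_equal_EnumAligns := by
  intro ephon jphon pre _ hpre
  unfold Spec_EnumAligns
  rw [A_spec ephon jphon pre hpre, B_spec]
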